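-- pv_equiv track=rewrite | github.com/Nomad1331/vite-spark | public/discord-bot/rank_card.py | next_rank_milestone
-- ===== SOURCE A (Python) =====
-- def next_rank_milestone(level):
--     """Get next rank and levels needed"""
--     milestones = [
--         (26, "D-RANK"),
--         (50, "C-RANK"),
--         (75, "B-RANK"),
--         (100, "A-RANK"),
--         (150, "S-RANK")
--     ]
--
--     for milestone_level, rank_name in milestones:
--         if level < milestone_level:
--             levels_needed = milestone_level - level
--             return levels_needed, rank_name
--
--     return None, "MAX RANK"
-- ===== SOURCE B (Python) =====
-- THRESHOLDS = [26, 50, 75, 100, 150]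
-- NAMES = ["D-RANK", "C-RANK", "B-RANK", "A-RANK", "S-RANK"]
--
-- def _bisect_right(xs, x, lo, hi):
--     """Index of first element strictly greater than x (binary search)."""
--     while lo < hi:
--         mid = (lo + hi) // 2
--         if x < xs[mid]:
--             hi = mid
--         else:
--             lo = mid + 1
--     return lo
--
-- def next_rank_milestone(level):
--     """Get next rank and levels needed"""
--     i = _bisect_right(THRESHOLDS, level, 0, len(THRESHOLDS))
--     if i == len(THRESHOLDS):
--         return None, "MAX RANK"
--     return THRESHOLDS[i] - level, NAMES[i]
-- ===== Notes on version B (the rewrite author's own statement) =====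
-- stated objective: alternative
-- what changed: Replaces the sequential scan over (threshold, name) pairs with a binary search (hand-written bisect_right) over a sorted threshold table, then indexes parallel name lists.
import Mathlib
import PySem

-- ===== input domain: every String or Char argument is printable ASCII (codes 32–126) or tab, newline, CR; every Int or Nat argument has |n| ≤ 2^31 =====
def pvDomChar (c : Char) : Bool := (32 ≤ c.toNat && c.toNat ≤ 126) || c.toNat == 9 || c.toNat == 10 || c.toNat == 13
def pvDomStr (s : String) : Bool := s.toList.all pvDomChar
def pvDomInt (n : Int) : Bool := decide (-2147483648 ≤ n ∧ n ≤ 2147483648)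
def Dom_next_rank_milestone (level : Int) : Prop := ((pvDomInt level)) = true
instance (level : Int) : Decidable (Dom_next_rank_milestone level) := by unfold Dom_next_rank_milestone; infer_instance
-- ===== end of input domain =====

-- B replaces A's sequential scan of the milestone table with a binary search (bisect_right) over a sorted threshold list with parallel names; objective: alternative algorithm of similar cost.


-- ===== PORT A =====
-- helper: A's loop over the milestone list, first threshold with level < threshold
def nrmLoop (level : Int) : List (Int × String) → Option Int × String
  | [] => (none, "MAX RANK")
  | (milestone_level, rank_name) :: rest =>
    if level < milestone_level then (some (milestone_level - level), rank_name)
    else nrmLoop level rest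

def next_rank_milestone (level : Int) : Option Int × String :=
  nrmLoop level [(26, "D-RANK"), (50, "C-RANK"), (75, "B-RANK"), (100, "A-RANK"), (150, "S-RANK")]

-- ===== PORT B =====
-- B's helper: bisect_right as a binary search over [lo, hi)
def bisectRight (xs : List Int) (x : Int) (lo hi : Nat) : Nat :=
  if _h : lo < hi then
    let mid := (lo + hi) / 2
    if x < xs.getD mid 0 then bisectRight xs x lo mid
    else bisectRight xs x (mid + 1) hi
  else lo
termination_by hi - lo

def nrmThresholds : List Int := [26, 50, 75, 100, 150]
def nrmNames : List String := ["D-RANK", "C-RANK", "B-RANK", "A-RANK", "S-RANK"]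

def next_rank_milestone_alt (level : Int) : Option Int × String :=
  let i := bisectRight nrmThresholds level 0 nrmThresholds.length
  if i = nrmThresholds.length then (none, "MAX RANK")
  else (some (nrmThresholds.getD i 0 - level), nrmNames.getD i "")

-- ===== PRECONDITION & SPEC =====
def Spec_next_rank_milestone (level : Int) (out : Option Int × String) : Prop := out = next_rank_milestone_alt level
instance (level : Int) (out : Option Int × String) : Decidable (Spec_next_rank_milestone level out) := by unfold Spec_next_rank_milestone; infer_instance

-- ===== CLAIM (what is proved, stated in full; the proofs are below) =====
def Claim_equal_next_rank_milestone : Prop := ∀ (level : Int), Dom_next_rank_milestone level → Spec_next_rank_milestone level (next_rank_milestone level)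

-- ===== LEMMAS AND PROOFS =====

-- ===== VERDICT (by name: the statement is the Claim_ definition above) =====
theorem next_rank_milestone_spec : Claim_equal_next_rank_milestone := by
  intro level _
  unfold Spec_next_rank_milestone next_rank_milestone next_rank_milestone_alt
  by_cases h26 : level < 26 <;> by_cases h50 : level < 50 <;>
    by_cases h75 : level < 75 <;> by_cases h100 : level < 100 <;>
    by_cases h150 : level < 150 <;>
    first
      | omega
      | simp [bisectRight, nrmThresholds, nrmNames, nrmLoop, h26, h50, h75, h100, h150]
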